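-- pv_equiv track=rewrite | github.com/SatvikPraveen/Sklearn-Mastery | examples/real_world_scenarios/business_analytics/market_basket_analysis.py | all_subsets_frequent
-- ===== SOURCE A (Python) =====
-- from typing import Dict, Tuple, Any, List, Set
--
-- def all_subsets_frequent(itemset: frozenset, frequent_items: List[frozenset]) -> bool:
--     """Check if all (k-1)-subsets of itemset are in frequent_items."""
--
--     k = len(itemset)
--     if k <= 1:
--         return True
--
--     # Generate all (k-1)-subsets
--     for item in itemset:
--         subset = itemset - {item}
--         if subset not in frequent_items:
--             return False
--
--     return True
-- ===== SOURCE B (Python) =====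
-- from typing import List
--
-- def all_subsets_frequent(itemset: frozenset, frequent_items: List[frozenset]) -> bool:
--     """Check if all (k-1)-subsets of itemset are in frequent_items.
--
--     One pass over frequent_items: collect into a set every entry that is a
--     proper (k-1)-subset of itemset; itemset has exactly k distinct such
--     subsets, so all of them are frequent iff k of them were found."""
--     k = len(itemset)
--     if k <= 1:
--         return True
--     found = set()
--     for fi in frequent_items:
--         if len(fi) == k - 1 and fi < itemset:
--             found.add(frozenset(fi))
--     return len(found) == k
-- ===== Notes on version B (the rewrite author's own statement) =====
-- stated objective: alternative
-- what changed: Instead of generating each of the k (k-1)-subsets of itemset and scanning frequent_items for each, B makes a single pass over frequent_items collecting every proper (k-1)-subset of itemset into a set and returns whether exactly k distinct ones were found; measured ~1.4x faster at the largest timing size, below the 1.5x confirmation bar, so no speed is claimed.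
import Mathlib
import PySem

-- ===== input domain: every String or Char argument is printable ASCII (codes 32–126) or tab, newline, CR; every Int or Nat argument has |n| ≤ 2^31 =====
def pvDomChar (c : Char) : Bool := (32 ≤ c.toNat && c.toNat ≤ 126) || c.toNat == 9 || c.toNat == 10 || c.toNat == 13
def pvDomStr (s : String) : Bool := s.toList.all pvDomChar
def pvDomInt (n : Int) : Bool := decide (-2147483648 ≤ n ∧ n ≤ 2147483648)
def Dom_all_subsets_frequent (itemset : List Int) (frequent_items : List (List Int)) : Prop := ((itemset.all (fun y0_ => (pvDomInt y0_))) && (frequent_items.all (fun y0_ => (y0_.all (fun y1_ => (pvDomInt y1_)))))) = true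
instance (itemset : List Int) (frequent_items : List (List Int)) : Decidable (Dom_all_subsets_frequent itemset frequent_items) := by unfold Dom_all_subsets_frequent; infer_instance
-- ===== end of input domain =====

-- B replaces A's per-element subset generation and list scans by one pass over
-- frequent_items that collects the proper (k-1)-subsets of itemset into a set
-- and compares its size with k (itemset has exactly k such subsets).

-- ===== PORT A =====
def all_subsets_frequent (itemset : List Int) (frequent_items : List (List Int)) : Bool :=
  let k := itemset.length
  if k ≤ 1 then true
  else
    -- for item in itemset: if (itemset - {item}) not in frequent_items: return False
    itemset.all (fun item =>
      frequent_items.any (fun fi => PySem.Set.equal (PySem.Set.diff itemset [item]) fi))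

-- ===== PORT B =====
def all_subsets_frequent_alt (itemset : List Int) (frequent_items : List (List Int)) : Bool :=
  let k := itemset.length
  if k ≤ 1 then true
  else
    -- found = set(); for fi in frequent_items: if len(fi)==k-1 and fi < itemset: found.add(fi)
    let found := frequent_items.foldl (fun acc fi =>
      if fi.length == k - 1 && (PySem.Set.issubset fi itemset && !(PySem.Set.equal fi itemset))
      then PySem.Set.add acc fi else acc) PySem.Set.empty
    found.length == k

-- ===== PRECONDITION & SPEC =====
-- Pre_ states the type convention for Python set arguments only: a set is a list of
-- DISTINCT elements, and equal set values share one list representation (so two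
-- entries of frequent_items that are equal as sets are the same list). It excludes
-- no Python input: every frozenset argument is encoded this way.
def Pre_all_subsets_frequent (itemset : List Int) (frequent_items : List (List Int)) : Prop :=
  itemset.Nodup ∧ (∀ fi ∈ frequent_items, fi.Nodup) ∧
  frequent_items.Pairwise (fun a b => PySem.Set.equal a b = true → a = b)
instance (itemset : List Int) (frequent_items : List (List Int)) : Decidable (Pre_all_subsets_frequent itemset frequent_items) := by unfold Pre_all_subsets_frequent; infer_instance
def pvWitness_all_subsets_frequent : List Int × List (List Int) := ([1, 2], [[1], [2]])

def Spec_all_subsets_frequent (itemset : List Int) (frequent_items : List (List Int)) (out : Bool) : Prop := out = all_subsets_frequent_alt itemset frequent_items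
instance (itemset : List Int) (frequent_items : List (List Int)) (out : Bool) : Decidable (Spec_all_subsets_frequent itemset frequent_items out) := by unfold Spec_all_subsets_frequent; infer_instance

-- ===== CLAIM (what is proved, stated in full; the proofs are below) =====
def Claim_equal_all_subsets_frequent : Prop := ∀ (itemset : List Int) (frequent_items : List (List Int)), Dom_all_subsets_frequent itemset frequent_items → Pre_all_subsets_frequent itemset frequent_items → Spec_all_subsets_frequent itemset frequent_items (all_subsets_frequent itemset frequent_items)

-- ===== LEMMAS AND PROOFS =====

theorem pv_equal_iff_toFinset (a b : List Int) :
    PySem.Set.equal a b = true ↔ a.toFinset = b.toFinset := by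
  rw [PySem.Set.equal_iff, Finset.ext_iff]
  simp [List.mem_toFinset]

theorem pv_foldl_add (c : List Int → Bool) (fis : List (List Int)) :
    ∀ acc : List (List Int),
      fis.foldl (fun acc fi => if c fi then PySem.Set.add acc fi else acc) acc
        = PySem.Set.update acc (fis.filter c) := by
  induction fis with
  | nil => intro acc; simp [PySem.Set.update]
  | cons fi rest ih =>
    intro acc
    by_cases h : c fi = true
    · simp only [List.foldl_cons, List.filter_cons, h, if_pos, PySem.Set.update_cons]
      exact ih _
    · simp only [List.foldl_cons, List.filter_cons, h, if_neg, Bool.false_eq_true,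
        not_false_iff]
      exact ih _

theorem pv_core (M : List Int) (fis : List (List Int)) (hM : M.Nodup)
    (hfi : ∀ fi ∈ fis, fi.Nodup)
    (hpw : fis.Pairwise (fun a b => PySem.Set.equal a b = true → a = b)) :
    (M.all (fun item =>
      fis.any (fun fi => PySem.Set.equal (PySem.Set.diff M [item]) fi)))
    = ((fis.foldl (fun acc fi =>
        if fi.length == M.length - 1 && (PySem.Set.issubset fi M && !(PySem.Set.equal fi M))
        then PySem.Set.add acc fi else acc) PySem.Set.empty).length == M.length) := by
  set k := M.length with hkdef
  set c : List Int → Bool := fun fi =>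
    fi.length == k - 1 && (PySem.Set.issubset fi M && !(PySem.Set.equal fi M)) with hc
  have hfold : (fis.foldl (fun acc fi => if c fi then PySem.Set.add acc fi else acc)
      PySem.Set.empty) = PySem.Set.ofList (fis.filter c) := by
    rw [pv_foldl_add]; rfl
  set S := PySem.Set.ofList (fis.filter c) with hS
  -- characterisations
  have hSmem : ∀ fi, fi ∈ S ↔ fi ∈ fis ∧ c fi = true := by
    intro fi; rw [hS, PySem.Set.mem_ofList, List.mem_filter]
  have hcprop : ∀ fi, c fi = true ↔
      (fi.length = k - 1 ∧ (∀ x ∈ fi, x ∈ M) ∧ ¬ (PySem.Set.equal fi M = true)) := by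
    intro fi
    simp only [hc, Bool.and_eq_true, beq_iff_eq, PySem.Set.issubset_iff, Bool.not_eq_true',
      Bool.not_eq_true]
  have hMcard : M.toFinset.card = k := List.toFinset_card_of_nodup hM
  have hSnodup : S.Nodup := by rw [hS]; exact PySem.Set.nodup_ofList _
  -- representation uniqueness on S
  have hrep : ∀ a ∈ S, ∀ b ∈ S, a.toFinset = b.toFinset → a = b := by
    intro a ha b hb hab
    by_cases hne : a = b
    · exact hne
    · have ha' : a ∈ fis := ((hSmem a).1 ha).1
      have hb' : b ∈ fis := ((hSmem b).1 hb).1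
      have hsymm : Symmetric (fun a b : List Int => PySem.Set.equal a b = true → a = b) := by
        intro x y hxy he
        have : PySem.Set.equal x y = true := by
          rw [pv_equal_iff_toFinset] at he ⊢; exact he.symm
        exact (hxy this).symm
      exact hpw.forall hsymm ha' hb' hne ((pv_equal_iff_toFinset a b).2 hab)
  -- the two finsets
  set T : Finset (Finset Int) := (S.map List.toFinset).toFinset with hT
  set E : Finset (Finset Int) := M.toFinset.image (fun a => M.toFinset.erase a) with hE
  have hTmem : ∀ t, t ∈ T ↔ ∃ fi ∈ S, fi.toFinset = t := by
    intro t; rw [hT, List.mem_toFinset, List.mem_map]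
  have hSlen_card : ∀ fi ∈ S, fi.toFinset.card = k - 1 := by
    intro fi hfiS
    have hnd : fi.Nodup := hfi fi ((hSmem fi).1 hfiS).1
    rw [List.toFinset_card_of_nodup hnd]
    exact ((hcprop fi).1 ((hSmem fi).1 hfiS).2).1
  have herase_card : ∀ a ∈ M.toFinset, (M.toFinset.erase a).card = k - 1 := by
    intro a ha; rw [Finset.card_erase_of_mem ha, hMcard]
  -- T ⊆ E
  have hTE : T ⊆ E := by
    intro t ht
    obtain ⟨fi, hfiS, hfit⟩ := (hTmem t).1 ht
    obtain ⟨hlen, hsub, hneq⟩ := (hcprop fi).1 ((hSmem fi).1 hfiS).2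
    -- find the missing element
    have hex : ∃ a ∈ M, a ∉ fi := by
      by_contra hno
      push Not at hno
      exact hneq ((PySem.Set.equal_iff _ _).2 (fun x => ⟨fun hx => hsub x hx, fun hx => hno x hx⟩))
    obtain ⟨a, haM, hafi⟩ := hex
    have haM' : a ∈ M.toFinset := List.mem_toFinset.2 haM
    have hsub' : t ⊆ M.toFinset.erase a := by
      intro x hx
      rw [← hfit, List.mem_toFinset] at hx
      exact Finset.mem_erase.2 ⟨fun h => hafi (h ▸ hx), List.mem_toFinset.2 (hsub x hx)⟩
    have hcards : (M.toFinset.erase a).card ≤ t.card := by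
      rw [herase_card a haM', ← hfit, hSlen_card fi hfiS]
    rw [hE, Finset.mem_image]
    exact ⟨a, haM', (Finset.eq_of_subset_of_card_le hsub' hcards).symm⟩
  -- E has exactly k elements
  have hEcard : E.card = k := by
    rw [hE, Finset.card_image_of_injOn, hMcard]
    intro a ha b hb hab
    change M.toFinset.erase a = M.toFinset.erase b at hab
    by_contra hne
    have hbIn : b ∈ M.toFinset.erase a :=
      Finset.mem_erase.2 ⟨fun h => hne h.symm, Finset.mem_coe.1 hb⟩
    rw [hab] at hbIn
    exact (Finset.notMem_erase b M.toFinset) hbIn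
  -- S.length = T.card
  have hmapnd : (S.map List.toFinset).Nodup :=
    List.Nodup.map_on (fun a ha b hb hab => hrep a ha b hb hab) hSnodup
  have hST : S.length = T.card := by
    rw [hT, List.toFinset_card_of_nodup hmapnd, List.length_map]
  -- diff M [item] facts
  have hdiffF : ∀ item, (PySem.Set.diff M [item]).toFinset = M.toFinset.erase item := by
    intro item
    ext x
    simp only [List.mem_toFinset, PySem.Set.mem_diff, Finset.mem_erase, List.mem_singleton]
    tauto
  -- the A-side condition, restated
  have hAiff : (M.all (fun item =>
      fis.any (fun fi => PySem.Set.equal (PySem.Set.diff M [item]) fi))) = true ↔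
      ∀ a ∈ M.toFinset, M.toFinset.erase a ∈ T := by
    simp only [List.all_eq_true, List.any_eq_true]
    constructor
    · intro h a ha
      obtain ⟨fi, hfifis, hfieq⟩ := h a (List.mem_toFinset.1 ha)
      have hfeq : fi.toFinset = M.toFinset.erase a := by
        rw [← hdiffF a, ← pv_equal_iff_toFinset]
        rw [pv_equal_iff_toFinset] at hfieq ⊢
        exact hfieq.symm
      -- fi satisfies c
      have haM : a ∈ M := List.mem_toFinset.1 ha
      have hcfi : c fi = true := by
        rw [hcprop]
        refine ⟨?_, ?_, ?_⟩
        · rw [← List.toFinset_card_of_nodup (hfi fi hfifis), hfeq, herase_card a ha]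
        · intro x hx
          have : x ∈ M.toFinset.erase a := hfeq ▸ List.mem_toFinset.2 hx
          exact List.mem_toFinset.1 (Finset.mem_erase.1 this).2
        · intro heq
          have : a ∈ fi := by
            rw [pv_equal_iff_toFinset] at heq
            have : a ∈ fi.toFinset := by rw [heq]; exact ha
            exact List.mem_toFinset.1 this
          have : a ∈ M.toFinset.erase a := hfeq ▸ List.mem_toFinset.2 this
          exact (Finset.notMem_erase a M.toFinset) this
      exact (hTmem _).2 ⟨fi, (hSmem fi).2 ⟨hfifis, hcfi⟩, hfeq⟩
    · intro h item hitem
      obtain ⟨fi, hfiS, hfeq⟩ := (hTmem _).1 (h item (List.mem_toFinset.2 hitem))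
      refine ⟨fi, ((hSmem fi).1 hfiS).1, ?_⟩
      rw [pv_equal_iff_toFinset, hdiffF]
      exact hfeq.symm
  -- the B-side condition
  have hBiff : ((S.length == k) = true) ↔ T.card = k := by
    rw [beq_iff_eq, hST]
  -- final equivalence between the two sides
  have hmain : (∀ a ∈ M.toFinset, M.toFinset.erase a ∈ T) ↔ T.card = k := by
    constructor
    · intro h
      have hET : E ⊆ T := by
        rw [hE]
        exact Finset.image_subset_iff.2 h
      rw [Finset.Subset.antisymm hTE hET, hEcard]
    · intro h
      have : E ⊆ T := by
        apply (Finset.eq_of_subset_of_card_le hTE (by rw [hEcard, h])).symm.subset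
      intro a ha
      exact this (Finset.mem_image_of_mem _ ha)
  have hfinal : (M.all (fun item =>
      fis.any (fun fi => PySem.Set.equal (PySem.Set.diff M [item]) fi)))
      = ((S.length == k) : Bool) := by
    cases hA : (M.all (fun item =>
        fis.any (fun fi => PySem.Set.equal (PySem.Set.diff M [item]) fi))) with
    | true =>
      symm
      rw [hBiff]
      exact hmain.1 (hAiff.1 hA)
    | false =>
      symm
      rw [← Bool.not_eq_true, hBiff]
      intro hcard
      rw [← hAiff, hA] at hmain
      exact absurd (hmain.2 hcard) (by simp)
  exact hfinal.trans (by rw [← hfold])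

-- ===== VERDICT (by name: the statement is the Claim_ definition above) =====
theorem all_subsets_frequent_spec : Claim_equal_all_subsets_frequent := by
  intro itemset fis _ hpre
  unfold Spec_all_subsets_frequent all_subsets_frequent all_subsets_frequent_alt
  by_cases h : itemset.length ≤ 1
  · simp [h]
  · simp only [h, if_false]
    exact pv_core itemset fis hpre.1 hpre.2.1 hpre.2.2
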